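-- pv_equiv track=rewrite | github.com/floraldo/hive | scripts/batch_syntax_fix.py | fix_incomplete_lines
-- ===== SOURCE A (Python) =====
-- def fix_incomplete_lines(content: str) -> str:
--     """Fix incomplete lines that are just identifiers."""
--     lines = content.split('\n')
--     fixed_lines = []
--
--     for i, line in enumerate(lines):
--         stripped = line.strip()
--
--         # Check if line is just an identifier
--         if (stripped and
--             stripped.replace('_', 'a').replace('0', 'a').replace('1', 'a').replace('2', 'a').replace('3', 'a').replace('4', 'a').replace('5', 'a').replace('6', 'a').replace('7', 'a').replace('8', 'a').replace('9', 'a').isidentifier() and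
--             i > 0):
--
--             prev_line = lines[i-1].strip()
--
--             # This might be a continuation of an import or call
--             if ('import' in prev_line or
--                 prev_line.endswith('(') or
--                 prev_line.endswith(',')):
--                 # Add comma to previous line if missing
--                 if not prev_line.endswith(',') and not prev_line.endswith('('):
--                     fixed_lines[-1] = fixed_lines[-1].rstrip() + ','
--
--         fixed_lines.append(line)
--
--     return '\n'.join(fixed_lines)
-- ===== SOURCE B (Python) =====
-- def fix_incomplete_lines(content: str) -> str:
--     """Backward single-pass state machine: walk the lines last-to-first carrying one
--     boolean flag (whether the following line is a bare identifier); emitted output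
--     is never re-touched."""
--     out = []
--     next_bare = False
--     for line in reversed(content.split('\n')):
--         p = line.strip()
--         if next_bare and 'import' in p and not p.endswith(',') and not p.endswith('('):
--             out.append(line.rstrip() + ',')
--         else:
--             out.append(line)
--         next_bare = bool(p) and all(c.isalnum() or c == '_' for c in p)
--     return '\n'.join(reversed(out))
-- ===== Notes on version B (the rewrite author's own statement) =====
-- stated objective: alternative
-- what changed: A walks the lines forward by index, appends each line, and reaches back to mutate the previously appended element when the current line is a bare identifier; B is a backward state machine: it walks the lines last-to-first carrying a single boolean flag saying whether the following line is a bare identifier, emits each line exactly once without ever rewriting emitted output, tests bareness directly as alnum-or-underscore characters instead of the ten-fold replace chain, reduces A's two-level guard to its logical core, and reverses the output at the end.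
import Mathlib
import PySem

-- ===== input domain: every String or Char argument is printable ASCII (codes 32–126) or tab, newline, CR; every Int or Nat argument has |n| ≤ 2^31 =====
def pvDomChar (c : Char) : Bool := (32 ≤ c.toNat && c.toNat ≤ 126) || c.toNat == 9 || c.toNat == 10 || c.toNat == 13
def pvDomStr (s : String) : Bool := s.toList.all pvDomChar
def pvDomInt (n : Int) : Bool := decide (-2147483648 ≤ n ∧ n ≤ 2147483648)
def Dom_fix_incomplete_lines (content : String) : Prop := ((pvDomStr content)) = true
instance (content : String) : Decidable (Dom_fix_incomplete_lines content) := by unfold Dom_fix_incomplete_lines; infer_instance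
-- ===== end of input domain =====

-- B replaces A's forward index loop that reaches back and mutates the previously appended line
-- with a backward state machine: a single fold over the reversed lines carrying one boolean flag
-- (whether the following line is a bare identifier), never rewriting anything already emitted;
-- objective: alternative.

-- ===== PORT A =====
-- str.isidentifier() ported by hand: exact for ASCII strings (the stated domain) — first char a
-- letter or '_', the rest letters, digits or '_'.
def pyIsIdentifier (cs : List Char) : Bool :=
  match cs with
  | [] => false
  | c :: rest => (PySem.Chars.isalpha c || c == '_') && rest.all (fun d => PySem.Chars.isalnum d || d == '_')

-- the literal chain stripped.replace('_','a').replace('0','a')…replace('9','a')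
def replChain (cs : List Char) : List Char :=
  PySem.Chars.replace (PySem.Chars.replace (PySem.Chars.replace (PySem.Chars.replace
    (PySem.Chars.replace (PySem.Chars.replace (PySem.Chars.replace (PySem.Chars.replace
      (PySem.Chars.replace (PySem.Chars.replace (PySem.Chars.replace cs
        ['_'] ['a']) ['0'] ['a']) ['1'] ['a']) ['2'] ['a']) ['3'] ['a']) ['4'] ['a'])
          ['5'] ['a']) ['6'] ['a']) ['7'] ['a']) ['8'] ['a']) ['9'] ['a']

-- fixed_lines[-1] = v  (Python's list assignment; the list is never empty when A reaches it)
def pySetLast (xs : List (List Char)) (v : List Char) : List (List Char) :=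
  match xs with
  | [] => []
  | [_] => [v]
  | x :: y :: r => x :: pySetLast (y :: r) v

-- for i, line in enumerate(lines): …
def fixLoop (lines : List (List Char)) : Int → List (List Char) → List (List Char) → List (List Char)
  | _, fixed, [] => fixed
  | i, fixed, line :: rest =>
    let stripped := PySem.Chars.strip line
    let fixed' :=
      if !stripped.isEmpty && pyIsIdentifier (replChain stripped) && decide (0 < i) then
        let prev := PySem.Chars.strip ((PySem.List.pyGet? lines (i - 1)).getD [])
        if PySem.Chars.isIn ['i','m','p','o','r','t'] prev || PySem.Chars.endswith prev ['('] ||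
            PySem.Chars.endswith prev [','] then
          if !PySem.Chars.endswith prev [','] && !PySem.Chars.endswith prev ['('] then
            pySetLast fixed (PySem.Chars.rstrip ((PySem.List.pyGet? fixed (-1)).getD []) ++ [','])
          else fixed
        else fixed
      else fixed
    fixLoop lines (i + 1) (fixed' ++ [line]) rest

def fix_incomplete_lines (content : String) : String :=
  let lines := PySem.Chars.splitOn content.toList ['\n']
  String.ofList (PySem.Chars.join ['\n'] (fixLoop lines 0 [] lines))

-- ===== PORT B =====
-- the body of Source B's backward loop: state = (next_bare, out); out.append(...) = st.2 ++ [o]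
def revStep (st : Bool × List (List Char)) (line : List Char) : Bool × List (List Char) :=
  let p := PySem.Chars.strip line
  let o :=
    if st.1 && PySem.Chars.isIn ['i','m','p','o','r','t'] p &&
        !PySem.Chars.endswith p [','] && !PySem.Chars.endswith p ['('] then
      PySem.Chars.rstrip line ++ [',']
    else line
  (!p.isEmpty && p.all (fun c => PySem.Chars.isalnum c || c == '_'), st.2 ++ [o])

def fix_incomplete_lines_alt (content : String) : String :=
  let lines := PySem.Chars.splitOn content.toList ['\n']
  let st := lines.reverse.foldl revStep (false, [])
  String.ofList (PySem.Chars.join ['\n'] st.2.reverse)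

-- ===== PRECONDITION & SPEC =====
def Spec_fix_incomplete_lines (content : String) (out : String) : Prop := out = fix_incomplete_lines_alt content
instance (content : String) (out : String) : Decidable (Spec_fix_incomplete_lines content out) := by unfold Spec_fix_incomplete_lines; infer_instance

-- ===== CLAIM (what is proved, stated in full; the proofs are below) =====
def Claim_equal_fix_incomplete_lines : Prop := ∀ (content : String), Dom_fix_incomplete_lines content → Spec_fix_incomplete_lines content (fix_incomplete_lines content)

-- ===== LEMMAS AND PROOFS =====

-- proof-side vocabulary: the per-pair output both programs agree on
def altBare (s : List Char) : Bool :=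
  let t := PySem.Chars.strip s
  !t.isEmpty && t.all (fun c => PySem.Chars.isalnum c || c == '_')

def altNeedsComma (cur : List Char) : Bool :=
  let p := PySem.Chars.strip cur
  PySem.Chars.isIn ['i','m','p','o','r','t'] p && !PySem.Chars.endswith p [','] &&
    !PySem.Chars.endswith p ['(']

def altPair (p : List Char × List Char) : List Char :=
  if altBare p.2 && altNeedsComma p.1 then PySem.Chars.rstrip p.1 ++ [','] else p.1

def pairsOut (l : List (List Char)) : List (List Char) := (l.zip l.tail).map altPair

def lastD (l : List (List Char)) : List Char := (PySem.List.pyGet? l (-1)).getD []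

-- single-character str.replace is a character map
theorem go_single (o n : Char) : ∀ (fuel : Nat) (l acc : List Char), l.length ≤ fuel →
    PySem.Chars.replace.go [o] [n] fuel l acc = acc.reverse ++ l.map (fun c => if c = o then n else c) := by
  intro fuel
  induction fuel with
  | zero =>
    intro l acc h
    have : l = [] := List.eq_nil_of_length_eq_zero (Nat.le_zero.mp h)
    subst this; simp [PySem.Chars.replace.go]
  | succ k ih =>
    intro l acc h
    match l with
    | [] => simp [PySem.Chars.replace.go]
    | c :: t =>
      simp only [PySem.Chars.replace.go]
      by_cases hc : c = o
      · simp [hc, List.isPrefixOf, ih t _ (by simpa using h)]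
      · have hp : ([o].isPrefixOf (c :: t)) = false := by
          simp [List.isPrefixOf]; exact fun he => hc he.symm
        simp [hp, hc, ih t _ (by simpa using h)]

theorem replace_single (cs : List Char) (o n : Char) :
    PySem.Chars.replace cs [o] [n] = cs.map (fun c => if c = o then n else c) := by
  simp [PySem.Chars.replace, go_single o n cs.length cs [] le_rfl]

def sub1 (o : Char) (c : Char) : Char := if c = o then 'a' else c

theorem replace_single' (cs : List Char) (o : Char) :
    PySem.Chars.replace cs [o] ['a'] = cs.map (sub1 o) := replace_single cs o 'a'

theorem char_eq_of_toNat (c d : Char) (h : c.toNat = d.toNat) : c = d := by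
  apply Char.ext; apply UInt32.toNat_inj.mp; exact h

theorem digit_enum (c : Char) (h : PySem.Chars.isdigit c = true) :
    c = '0' ∨ c = '1' ∨ c = '2' ∨ c = '3' ∨ c = '4' ∨ c = '5' ∨ c = '6' ∨ c = '7' ∨ c = '8' ∨ c = '9' := by
  simp [PySem.Chars.isdigit, Char.le_def] at h
  obtain ⟨h1, h2⟩ := h
  have h1' : 48 ≤ c.toNat := h1
  have h2' : c.toNat ≤ 57 := h2
  have hd : c.toNat = 48 ∨ c.toNat = 49 ∨ c.toNat = 50 ∨ c.toNat = 51 ∨ c.toNat = 52 ∨ c.toNat = 53 ∨ c.toNat = 54 ∨ c.toNat = 55 ∨ c.toNat = 56 ∨ c.toNat = 57 := by omega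
  rcases hd with h|h|h|h|h|h|h|h|h|h
  · exact Or.inl (char_eq_of_toNat c '0' h)
  · exact Or.inr (Or.inl (char_eq_of_toNat c '1' h))
  · exact Or.inr (Or.inr (Or.inl (char_eq_of_toNat c '2' h)))
  · exact Or.inr (Or.inr (Or.inr (Or.inl (char_eq_of_toNat c '3' h))))
  · exact Or.inr (Or.inr (Or.inr (Or.inr (Or.inl (char_eq_of_toNat c '4' h)))))
  · exact Or.inr (Or.inr (Or.inr (Or.inr (Or.inr (Or.inl (char_eq_of_toNat c '5' h))))))
  · exact Or.inr (Or.inr (Or.inr (Or.inr (Or.inr (Or.inr (Or.inl (char_eq_of_toNat c '6' h)))))))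
  · exact Or.inr (Or.inr (Or.inr (Or.inr (Or.inr (Or.inr (Or.inr (Or.inl (char_eq_of_toNat c '7' h))))))))
  · exact Or.inr (Or.inr (Or.inr (Or.inr (Or.inr (Or.inr (Or.inr (Or.inr (Or.inl (char_eq_of_toNat c '8' h)))))))))
  · exact Or.inr (Or.inr (Or.inr (Or.inr (Or.inr (Or.inr (Or.inr (Or.inr (Or.inr (char_eq_of_toNat c '9' h)))))))))

def subChar (c : Char) : Char := if PySem.Chars.isdigit c || c == '_' then 'a' else c

theorem chain_char (c : Char) :
    sub1 '9' (sub1 '8' (sub1 '7' (sub1 '6' (sub1 '5' (sub1 '4' (sub1 '3' (sub1 '2'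
      (sub1 '1' (sub1 '0' (sub1 '_' c)))))))))) = subChar c := by
  by_cases h : c = '_'
  · subst h; decide
  by_cases hd : PySem.Chars.isdigit c = true
  · rcases digit_enum c hd with e|e|e|e|e|e|e|e|e|e <;> subst e <;> decide
  · have hd' : PySem.Chars.isdigit c = false := by simpa using hd
    have h0 : c ≠ '0' := by intro e; rw [e] at hd'; exact absurd hd' (by decide)
    have h1 : c ≠ '1' := by intro e; rw [e] at hd'; exact absurd hd' (by decide)
    have h2 : c ≠ '2' := by intro e; rw [e] at hd'; exact absurd hd' (by decide)
    have h3 : c ≠ '3' := by intro e; rw [e] at hd'; exact absurd hd' (by decide)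
    have h4 : c ≠ '4' := by intro e; rw [e] at hd'; exact absurd hd' (by decide)
    have h5 : c ≠ '5' := by intro e; rw [e] at hd'; exact absurd hd' (by decide)
    have h6 : c ≠ '6' := by intro e; rw [e] at hd'; exact absurd hd' (by decide)
    have h7 : c ≠ '7' := by intro e; rw [e] at hd'; exact absurd hd' (by decide)
    have h8 : c ≠ '8' := by intro e; rw [e] at hd'; exact absurd hd' (by decide)
    have h9 : c ≠ '9' := by intro e; rw [e] at hd'; exact absurd hd' (by decide)
    simp [sub1, subChar, hd', h, h0, h1, h2, h3, h4, h5, h6, h7, h8, h9]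

theorem replChain_eq_map (t : List Char) : replChain t = t.map subChar := by
  rw [replChain]
  rw [replace_single', replace_single', replace_single', replace_single', replace_single',
      replace_single', replace_single', replace_single', replace_single', replace_single',
      replace_single']
  simp only [List.map_map]
  exact List.map_congr_left (fun c _ => by simpa [Function.comp] using chain_char c)

theorem head_char (c : Char) :
    (PySem.Chars.isalpha (subChar c) || subChar c == '_') = (PySem.Chars.isalnum c || c == '_') := by
  by_cases hd : PySem.Chars.isdigit c = true
  · simp [subChar, hd, PySem.Chars.isalnum]; decide
  · have hd' : PySem.Chars.isdigit c = false := by simpa using hd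
    by_cases h : c = '_'
    · subst h; decide
    · simp [subChar, hd', h, PySem.Chars.isalnum]

theorem tail_char (c : Char) :
    (PySem.Chars.isalnum (subChar c) || subChar c == '_') = (PySem.Chars.isalnum c || c == '_') := by
  by_cases hd : PySem.Chars.isdigit c = true
  · simp [subChar, hd, PySem.Chars.isalnum]; decide
  · have hd' : PySem.Chars.isdigit c = false := by simpa using hd
    by_cases h : c = '_'
    · subst h; decide
    · simp [subChar, hd', h]

-- A's "nonempty and the replace-chain is an identifier" test is exactly the bare-identifier test
theorem bare_eq (s : List Char) :
    (!(PySem.Chars.strip s).isEmpty && pyIsIdentifier (replChain (PySem.Chars.strip s))) = altBare s := by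
  simp only [altBare]
  generalize PySem.Chars.strip s = t
  rw [replChain_eq_map]
  cases t with
  | nil => simp [pyIsIdentifier]
  | cons c cs =>
    simp only [pyIsIdentifier, List.map_cons, List.all_map, List.isEmpty_cons, Bool.not_false,
      Bool.true_and]
    rw [head_char]
    congr 1
    induction cs with
    | nil => rfl
    | cons d ds ihd => simp only [List.all_cons, Function.comp_apply, ihd, tail_char]

theorem lastD_snoc (q : List (List Char)) (x : List Char) : lastD (q ++ [x]) = x := by
  simp [lastD, PySem.List.pyGet?, PySem.List.pyIdx?]

theorem lastD_cons_cons (x y : List Char) (t : List (List Char)) :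
    lastD (x :: y :: t) = lastD (y :: t) := by
  rcases List.eq_nil_or_concat (y :: t) with h | ⟨q, b, h⟩
  · exact absurd h (by simp)
  · rw [h, List.concat_eq_append, show x :: (q ++ [b]) = (x :: q) ++ [b] by simp,
      lastD_snoc, lastD_snoc]

theorem pySetLast_snoc (q : List (List Char)) (x v : List Char) : pySetLast (q ++ [x]) v = q ++ [v] := by
  induction q with
  | nil => simp [pySetLast]
  | cons a q ih =>
    cases q with
    | nil => simp [pySetLast]
    | cons b q' => simpa [pySetLast] using ih

theorem pairsOut_snoc (q : List (List Char)) (x r : List Char) :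
    pairsOut (q ++ [x, r]) = pairsOut (q ++ [x]) ++ [altPair (x, r)] := by
  induction q with
  | nil => simp [pairsOut]
  | cons a q ih =>
    cases q with
    | nil => simp [pairsOut]
    | cons b q' => simpa [pairsOut] using ih

theorem pairsOut_cons (h r : List Char) (t : List (List Char)) :
    pairsOut (h :: r :: t) = altPair (h, r) :: pairsOut (r :: t) := by
  simp [pairsOut]

theorem getPrev (q : List (List Char)) (x : List Char) (todo : List (List Char)) :
    (PySem.List.pyGet? (q ++ x :: todo) ((↑q.length + 1 : Int) - 1)).getD [] = x := by
  have h : ((↑q.length + 1 : Int) - 1) = ((q.length : Nat) : Int) := by ring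
  rw [h, PySem.List.pyGet?_natCast]
  simp

-- invariant of A's loop: once the first q.length+1 lines are consumed, the accumulator is the
-- pairwise output on them with the most recent line still unmodified
theorem loop_inv (lines : List (List Char)) :
    ∀ (todo q : List (List Char)) (x : List Char), lines = q ++ x :: todo →
    fixLoop lines (↑q.length + 1) (pairsOut (q ++ [x]) ++ [x]) todo
      = pairsOut (q ++ x :: todo) ++ [lastD (q ++ x :: todo)] := by
  intro todo
  induction todo with
  | nil =>
    intro q x hl
    show pairsOut (q ++ [x]) ++ [x] = pairsOut (q ++ [x]) ++ [lastD (q ++ [x])]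
    rw [lastD_snoc]
  | cons r rest ih =>
    intro q x hl
    show fixLoop lines (↑q.length + 1 + 1) (_ ++ [r]) rest = _
    have hpos : (decide ((0:Int) < ↑q.length + 1)) = true := by simp
    have hprev : (PySem.List.pyGet? lines ((↑q.length + 1 : Int) - 1)).getD [] = x := by
      rw [hl]; exact getPrev q x (r :: rest)
    have hfix : (if !(PySem.Chars.strip r).isEmpty && pyIsIdentifier (replChain (PySem.Chars.strip r)) && decide (0 < (↑q.length + 1 : Int)) then
        let prev := PySem.Chars.strip ((PySem.List.pyGet? lines ((↑q.length + 1 : Int) - 1)).getD [])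
        if PySem.Chars.isIn ['i','m','p','o','r','t'] prev || PySem.Chars.endswith prev ['('] ||
            PySem.Chars.endswith prev [','] then
          if !PySem.Chars.endswith prev [','] && !PySem.Chars.endswith prev ['('] then
            pySetLast (pairsOut (q ++ [x]) ++ [x]) (PySem.Chars.rstrip ((PySem.List.pyGet? (pairsOut (q ++ [x]) ++ [x]) (-1)).getD []) ++ [','])
          else pairsOut (q ++ [x]) ++ [x]
        else pairsOut (q ++ [x]) ++ [x]
      else pairsOut (q ++ [x]) ++ [x]) = pairsOut (q ++ [x]) ++ [altPair (x, r)] := by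
      rw [bare_eq, hpos, hprev]
      have hlast : (PySem.List.pyGet? (pairsOut (q ++ [x]) ++ [x]) (-1)).getD [] = x := lastD_snoc _ _
      rw [hlast, pySetLast_snoc]
      simp only [altPair, altNeedsComma, Bool.and_true]
      cases hb : altBare r <;>
        cases h1 : PySem.Chars.isIn ['i','m','p','o','r','t'] (PySem.Chars.strip x) <;>
        cases h2 : PySem.Chars.endswith (PySem.Chars.strip x) ['('] <;>
        cases h3 : PySem.Chars.endswith (PySem.Chars.strip x) [','] <;>
        simp [hb, h1, h2, h3]
    rw [hfix]
    have := ih (q ++ [x]) r (by simpa using hl)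
    have hlen : ((↑(q ++ [x]).length + 1 : Int)) = (↑q.length + 1 + 1 : Int) := by
      push_cast [List.length_append, List.length_cons, List.length_nil]; ring
    rw [hlen] at this
    have hlist : (q ++ [x]) ++ r :: rest = q ++ x :: r :: rest := by simp
    have hacc : pairsOut ((q ++ [x]) ++ [r]) ++ [r] = pairsOut (q ++ [x]) ++ [altPair (x, r)] ++ [r] := by
      rw [show (q ++ [x]) ++ [r] = q ++ [x, r] by simp, pairsOut_snoc]
    rw [hlist] at this
    rw [← hacc]
    exact this

theorem go_ne_nil (sep : List Char) : ∀ (fuel : Nat) (l cur : List Char) (acc : List (List Char)),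
    PySem.Chars.splitOn.go sep fuel l cur acc ≠ [] := by
  intro fuel
  induction fuel with
  | zero => intro l cur acc; cases l <;> simp [PySem.Chars.splitOn.go]
  | succ k ih =>
    intro l cur acc
    cases l with
    | nil => simp [PySem.Chars.splitOn.go]
    | cons c rest =>
      simp only [PySem.Chars.splitOn.go]
      split
      · apply ih
      · apply ih

theorem splitOn_ne_nil (s sep : List Char) : PySem.Chars.splitOn s sep ≠ [] := by
  simp only [PySem.Chars.splitOn]
  apply go_ne_nil

theorem fixLoop_run (lines : List (List Char)) (y : List Char) (todo : List (List Char))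
    (hl : lines = y :: todo) :
    fixLoop lines 0 [] (y :: todo) = pairsOut (y :: todo) ++ [lastD (y :: todo)] := by
  have key := loop_inv lines todo [] y (by simpa using hl)
  simp only [fixLoop]
  simp only [show (decide ((0:Int) < 0)) = false from rfl, Bool.and_false, Bool.false_eq_true,
    if_false, List.nil_append]
  simpa using key

-- B's backward fold, characterised: after consuming a nonempty block in reverse, the flag is
-- 'is the block's first line bare' and the output is the pairwise result, reversed
theorem revFold : ∀ (t : List (List Char)) (h : List Char) (a0 : List (List Char)),
    ((h :: t).reverse).foldl revStep (false, a0)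
      = (altBare h, a0 ++ (pairsOut (h :: t) ++ [lastD (h :: t)]).reverse) := by
  intro t
  induction t with
  | nil =>
    intro h a0
    simp only [List.reverse_cons, List.reverse_nil, List.nil_append, List.foldl_cons,
      List.foldl_nil, revStep, Bool.false_and, Bool.false_eq_true, if_false]
    refine congrArg _ ?_
    simp [pairsOut, lastD, PySem.List.pyGet?, PySem.List.pyIdx?]
  | cons r t' ih =>
    intro h a0
    have hrev : ((h :: r :: t').reverse) = ((r :: t').reverse) ++ [h] := by simp
    rw [hrev, List.foldl_append, ih r a0, List.foldl_cons, List.foldl_nil]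
    simp only [revStep]
    rw [pairsOut_cons, lastD_cons_cons]
    have hsnd : (if (altBare r && PySem.Chars.isIn ['i','m','p','o','r','t'] (PySem.Chars.strip h) &&
          !PySem.Chars.endswith (PySem.Chars.strip h) [','] &&
          !PySem.Chars.endswith (PySem.Chars.strip h) ['(']) = true then
        PySem.Chars.rstrip h ++ [','] else h) = altPair (h, r) := by
      simp only [altPair, altNeedsComma]
      cases hb : altBare r <;>
        cases h1 : PySem.Chars.isIn ['i','m','p','o','r','t'] (PySem.Chars.strip h) <;>
        cases h2 : PySem.Chars.endswith (PySem.Chars.strip h) ['('] <;>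
        cases h3 : PySem.Chars.endswith (PySem.Chars.strip h) [','] <;>
        simp [hb, h1, h2, h3]
    rw [hsnd]
    refine congrArg (Prod.mk _) ?_
    simp [List.append_assoc]

-- ===== VERDICT (by name: the statement is the Claim_ definition above) =====
theorem fix_incomplete_lines_spec : Claim_equal_fix_incomplete_lines := by
  intro content _
  show fix_incomplete_lines content = fix_incomplete_lines_alt content
  rw [fix_incomplete_lines, fix_incomplete_lines_alt]
  cases hl : PySem.Chars.splitOn content.toList ['\n'] with
  | nil => exact absurd hl (splitOn_ne_nil _ _)
  | cons y todo =>
    rw [fixLoop_run (y :: todo) y todo rfl, revFold todo y []]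
    simp
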